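-- pv_equiv track=rewrite | github.com/pypi-data/pypi-mirror-55 | packages/bomail/bomail-0.9.4.1.tar.gz/bomail-0.9.4.1/bomail/util/addr.py | is_valid_quotestr
-- ===== SOURCE A (Python) =====
-- def is_valid_quotestr(s):
--   if len(s) < 2:
--     return False
--   if s[0] != '"':
--     return False
--   i = 1
--   while i < len(s)-1:
--     if s[i] == '\\':
--       i += 1  # skip escaped character
--     elif s[i] == '"':
--       return False  # error: ended early
--     i += 1
--   if i != len(s)-1 or s[-1] != '"':
--     return False
--   return True
-- ===== SOURCE B (Python) =====
-- def is_valid_quotestr(s):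
--   # Quote-occurrence scan: jump between '"' occurrences with str.find and decide
--   # each by the parity of the backslash run immediately before it (even = unescaped).
--   if len(s) < 2 or s[0] != '"' or s[-1] != '"':
--     return False
--   j = s.find('"', 1)
--   while j != -1:
--     k = j - 1
--     while s[k] == '\\':
--       k -= 1
--     escaped = (j - 1 - k) % 2 == 1
--     if j == len(s) - 1:
--       return not escaped
--     if not escaped:
--       return False
--     j = s.find('"', j + 1)
--   return False
-- ===== Notes on version B (the rewrite author's own statement) =====
-- stated objective: alternative
-- what changed: Instead of A's forward character-by-character scan that jumps the index past escaped characters, B jumps directly between '"' occurrences with str.find and classifies each occurrence by the parity of the maximal backslash run immediately before it (even = unescaped), accepting iff the first unescaped quote after position 0 is the final character.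
import Mathlib
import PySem

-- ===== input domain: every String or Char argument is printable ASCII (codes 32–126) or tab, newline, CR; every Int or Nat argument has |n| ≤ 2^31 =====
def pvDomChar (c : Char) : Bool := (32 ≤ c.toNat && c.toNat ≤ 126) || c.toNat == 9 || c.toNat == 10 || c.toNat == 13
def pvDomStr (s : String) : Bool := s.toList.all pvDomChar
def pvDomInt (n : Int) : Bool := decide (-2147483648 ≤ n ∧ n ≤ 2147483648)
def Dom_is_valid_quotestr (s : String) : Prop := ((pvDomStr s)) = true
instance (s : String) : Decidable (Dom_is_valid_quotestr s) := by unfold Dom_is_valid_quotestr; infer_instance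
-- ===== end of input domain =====

-- B replaces A's forward escape-skipping character scan by a str.find jump between quote
-- occurrences, deciding each by the parity of the backslash run before it; same O(n) cost.


-- ===== PORT A =====
-- A's while loop: returns none on the early `return False` (unescaped '"' before the end),
-- else the final value of i.
def pvALoop (cs : List Char) (i : Nat) : Option Nat :=
  if i < cs.length - 1 then
    if cs.getD i ' ' = '\\' then pvALoop cs (i + 2)
    else if cs.getD i ' ' = '"' then none
    else pvALoop cs (i + 1)
  else some i
termination_by cs.length - i

def is_valid_quotestr (s : String) : Bool :=
  if s.toList.length < 2 then false
  else if s.toList.getD 0 ' ' ≠ '"' then false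
  else
    match pvALoop s.toList 1 with
    | none => false
    | some i =>
      if i ≠ s.toList.length - 1 ∨ s.toList.getD (s.toList.length - 1) ' ' ≠ '"' then false
      else true

-- ===== PORT B =====
-- B's inner `while s[k] == '\\': k -= 1` backward run counter (returns j-1-k, the run length).
-- Python never reads below index 0 here because B's guard ensures s[0] = '"'; the k = 0
-- backslash branch is unreachable under that guard.
def pvBRun (cs : List Char) (k : Nat) : Nat :=
  if cs.getD k ' ' = '\\' then
    match k with
    | 0 => 1
    | k' + 1 => pvBRun cs k' + 1
  else 0

-- B's `j = s.find('"', n)` (PySem.Chars.findFrom is Python's str.find with a start).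
def pvBStep (cs : List Char) (n : Nat) : Int := PySem.Chars.findFrom cs ['"'] (n : Int) none

-- Needed by pvBScan's termination proof (cited in decreasing_by).
theorem pvBStep_bounds (cs : List Char) (n : Nat) (h : pvBStep cs n ≠ -1) :
    n ≤ (pvBStep cs n).toNat ∧ (pvBStep cs n).toNat < cs.length := by
  by_cases hn : n ≤ cs.length
  · obtain ⟨hge, hpre, -⟩ := PySem.Chars.findFrom_natCast_spec cs ['"'] n hn h
    have hne : cs.drop (pvBStep cs n).toNat ≠ [] := by
      intro he
      rw [show PySem.Chars.findFrom cs ['"'] (↑n) none = pvBStep cs n from rfl] at hpre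
      rw [he] at hpre
      simp at hpre
    have hlt : (pvBStep cs n).toNat < cs.length := by
      by_contra hge2
      exact hne (List.drop_eq_nil_of_le (by omega))
    refine ⟨?_, hlt⟩
    have : (n : Int) ≤ pvBStep cs n := hge
    omega
  · exfalso
    apply h
    simp only [pvBStep, PySem.Chars.findFrom]
    split_ifs <;> omega

-- B's outer loop: each iteration starts by computing j = s.find('"', n)
-- (n = 1 initially, j+1 afterwards) and decides or continues.
def pvBScan (cs : List Char) (n : Nat) : Bool :=
  if h : pvBStep cs n = -1 then false
  else
    let jn := (pvBStep cs n).toNat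
    if jn = cs.length - 1 then decide (pvBRun cs (jn - 1) % 2 = 0)
    else if pvBRun cs (jn - 1) % 2 = 0 then false
    else pvBScan cs (jn + 1)
termination_by cs.length - n
decreasing_by
  have hb := pvBStep_bounds cs n h
  omega

def is_valid_quotestr_alt (s : String) : Bool :=
  if s.toList.length < 2 ∨ s.toList.getD 0 ' ' ≠ '"'
      ∨ s.toList.getD (s.toList.length - 1) ' ' ≠ '"' then false
  else pvBScan s.toList 1

-- ===== PRECONDITION & SPEC =====
def Spec_is_valid_quotestr (s : String) (out : Bool) : Prop := out = is_valid_quotestr_alt s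
instance (s : String) (out : Bool) : Decidable (Spec_is_valid_quotestr s out) := by unfold Spec_is_valid_quotestr; infer_instance

-- ===== CLAIM (what is proved, stated in full; the proofs are below) =====
def Claim_equal_is_valid_quotestr : Prop := ∀ (s : String), Dom_is_valid_quotestr s → Spec_is_valid_quotestr s (is_valid_quotestr s)

-- ===== LEMMAS AND PROOFS =====

-- Backslash-run length ending at index j-1, scanned downward but never below index m.
def pvRcount (cs : List Char) (m j : Nat) : Nat :=
  if j ≤ m then 0
  else if cs.getD (j - 1) ' ' = '\\' then pvRcount cs m (j - 1) + 1
  else 0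
termination_by j

theorem pvRcount_lower_not_bs (cs : List Char) (m : Nat) (hm : cs.getD m ' ' ≠ '\\') :
    ∀ j, pvRcount cs m j = pvRcount cs (m + 1) j := by
  intro j
  induction j using Nat.strong_induction_on with
  | _ j ih =>
    rw [pvRcount.eq_def cs m j, pvRcount.eq_def cs (m + 1) j]
    by_cases hj : j ≤ m
    · rw [if_pos hj, if_pos (by omega)]
    · rw [if_neg hj]
      by_cases hj1 : j ≤ m + 1
      · rw [if_pos hj1, show j - 1 = m from by omega, if_neg hm]
      · rw [if_neg hj1]
        by_cases hb : cs.getD (j - 1) ' ' = '\\'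
        · rw [if_pos hb, if_pos hb, ih (j - 1) (by omega)]
        · rw [if_neg hb, if_neg hb]

theorem pvRcount_lower_two (cs : List Char) (m j : Nat) (hm : cs.getD m ' ' = '\\')
    (hj : m + 2 ≤ j) : pvRcount cs m j % 2 = pvRcount cs (m + 2) j % 2 := by
  induction j using Nat.strong_induction_on with
  | _ j ih =>
    by_cases hje : j = m + 2
    · subst hje
      have e1 : pvRcount cs m (m + 1) = 1 := by
        rw [pvRcount.eq_def cs m (m + 1), if_neg (by omega),
            show m + 1 - 1 = m from by omega, if_pos hm,
            pvRcount.eq_def cs m m, if_pos le_rfl]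
      rw [pvRcount.eq_def cs (m + 2) (m + 2), if_pos le_rfl,
          pvRcount.eq_def cs m (m + 2), if_neg (by omega),
          show m + 2 - 1 = m + 1 from by omega]
      by_cases hb : cs.getD (m + 1) ' ' = '\\'
      · rw [if_pos hb, e1]
      · rw [if_neg hb]
    · rw [pvRcount.eq_def cs m j, pvRcount.eq_def cs (m + 2) j,
          if_neg (show ¬ j ≤ m by omega), if_neg (show ¬ j ≤ m + 2 by omega)]
      by_cases hb : cs.getD (j - 1) ' ' = '\\'
      · rw [if_pos hb, if_pos hb]
        have := ih (j - 1) (by omega) (by omega)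
        omega
      · rw [if_neg hb, if_neg hb]

theorem pvBRun_eq_rcount (cs : List Char) (n j : Nat) (h1 : 1 ≤ n)
    (hprev : cs.getD (n - 1) ' ' ≠ '\\') (hnj : n ≤ j) :
    pvBRun cs (j - 1) = pvRcount cs n j := by
  induction j using Nat.strong_induction_on with
  | _ j ih =>
    by_cases hje : j = n
    · subst hje
      rw [pvRcount.eq_def cs j j, if_pos le_rfl, pvBRun.eq_def cs (j - 1), if_neg hprev]
    · rw [pvRcount.eq_def cs n j, if_neg (by omega), pvBRun.eq_def cs (j - 1)]
      by_cases hb : cs.getD (j - 1) ' ' = '\\'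
      · rw [if_pos hb, if_pos hb, show j - 1 = (j - 2) + 1 from by omega]
        show pvBRun cs (j - 2) + 1 = pvRcount cs n ((j - 2) + 1) + 1
        have hih := ih (j - 1) (by omega) (by omega)
        rw [show j - 1 - 1 = j - 2 from by omega] at hih
        rw [hih, show (j - 2) + 1 = j - 1 from by omega]
      · rw [if_neg hb, if_neg hb]

-- A's walk from an unescaped position m up to the next quote position jn:
-- it lands on jn when the backslash run before jn (within [m, jn)) is even, past it when odd.
theorem pvAWalk (cs : List Char) (m jn : Nat) (h2 : 2 ≤ cs.length)
    (hjn : jn ≤ cs.length - 1) (hm : m ≤ jn)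
    (noq : ∀ i, m ≤ i → i < jn → cs.getD i ' ' ≠ '"') :
    pvALoop cs m = if pvRcount cs m jn % 2 = 0 then pvALoop cs jn else pvALoop cs (jn + 1) := by
  by_cases hmj : m = jn
  · subst hmj
    rw [pvRcount.eq_def cs m m, if_pos le_rfl]
    norm_num
  · have hmlt : m < jn := by omega
    have hloop : m < cs.length - 1 := by omega
    rw [pvALoop, if_pos hloop]
    by_cases hb : cs.getD m ' ' = '\\'
    · rw [if_pos hb]
      by_cases he : m + 1 = jn
      · subst he
        have hr : pvRcount cs m (m + 1) = 1 := by
          rw [pvRcount.eq_def cs m (m + 1), if_neg (by omega),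
              show m + 1 - 1 = m from by omega, if_pos hb,
              pvRcount.eq_def cs m m, if_pos le_rfl]
        rw [hr, if_neg (by omega), show m + 1 + 1 = m + 2 from by omega]
      · have ih := pvAWalk cs (m + 2) jn h2 hjn (by omega)
          (fun i hi1 hi2 => noq i (by omega) hi2)
        rw [ih, pvRcount_lower_two cs m jn hb (by omega)]
    · have hq : cs.getD m ' ' ≠ '"' := noq m le_rfl hmlt
      rw [if_neg hb, if_neg hq]
      have ih := pvAWalk cs (m + 1) jn h2 hjn (by omega)
        (fun i hi1 hi2 => noq i (by omega) hi2)
      rw [ih, ← pvRcount_lower_not_bs cs m hb jn]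
termination_by jn - m

-- Main invariant: from any restart position n (entered unescaped, behind a non-backslash),
-- A's remaining loop + post-loop check equals B's remaining quote-occurrence scan.
theorem pv_main (cs : List Char) (n : Nat) (h2 : 2 ≤ cs.length)
    (hlast : cs.getD (cs.length - 1) ' ' = '"') (h1 : 1 ≤ n) (hn : n ≤ cs.length - 1)
    (hprev : cs.getD (n - 1) ' ' ≠ '\\') :
    (match pvALoop cs n with
     | none => false
     | some i =>
       if i ≠ cs.length - 1 ∨ cs.getD (cs.length - 1) ' ' ≠ '"' then false else true)
    = pvBScan cs n := by
  rw [pvBScan.eq_def cs n]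
  by_cases hj : pvBStep cs n = -1
  · exfalso
    have hmem : '"' ∈ cs.drop n := by
      have hlt : cs.length - 1 < cs.length := by omega
      have hgl : cs[cs.length - 1]'hlt = '"' := by
        rw [← List.getD_eq_getElem cs ' ' hlt]; exact hlast
      have hdlen : cs.length - 1 - n < (cs.drop n).length := by
        simp only [List.length_drop]; omega
      have hmm := List.getElem_mem hdlen
      have he : (cs.drop n)[cs.length - 1 - n]'hdlen = '"' := by
        rw [List.getElem_drop]
        rw [← hgl]
        congr 1
        omega
      rw [he] at hmm
      exact hmm
    obtain ⟨l1, l2, hsplit⟩ := List.append_of_mem hmem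
    have hinf : ['"'] <:+: cs.drop n := ⟨l1, l2, by simpa using hsplit.symm⟩
    rw [show pvBStep cs n = PySem.Chars.findFrom cs ['"'] (↑n) none from rfl] at hj
    rw [PySem.Chars.findFrom_natCast_eq_neg_one_iff cs ['"'] n (by omega)] at hj
    exact hj hinf
  · rw [dif_neg hj]
    simp only []
    obtain ⟨hnle, hlt⟩ := pvBStep_bounds cs n hj
    obtain ⟨-, hpre, hmin⟩ :=
      PySem.Chars.findFrom_natCast_spec cs ['"'] n (by omega) hj
    rw [show PySem.Chars.findFrom cs ['"'] (↑n) none = pvBStep cs n from rfl] at hpre hmin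
    have hq : cs.getD (pvBStep cs n).toNat ' ' = '"' := by
      rw [List.drop_eq_getElem_cons hlt] at hpre
      obtain ⟨t, ht⟩ := hpre
      rw [List.singleton_append] at ht
      injection ht with h1 h2
      rw [List.getD_eq_getElem cs ' ' hlt, ← h1]
    have noq : ∀ i, n ≤ i → i < (pvBStep cs n).toNat → cs.getD i ' ' ≠ '"' := by
      intro i hi1 hi2 hqi
      apply hmin i hi1 hi2
      have hilt : i < cs.length := by omega
      rw [List.drop_eq_getElem_cons hilt, List.cons_prefix_cons]
      refine ⟨?_, List.nil_prefix⟩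
      rw [← List.getD_eq_getElem cs ' ' hilt, hqi]
    have hwalk := pvAWalk cs n (pvBStep cs n).toNat h2 (by omega) hnle noq
    have hrun : pvBRun cs ((pvBStep cs n).toNat - 1) = pvRcount cs n (pvBStep cs n).toNat :=
      pvBRun_eq_rcount cs n (pvBStep cs n).toNat h1 hprev hnle
    rw [hwalk, hrun]
    by_cases hpar : pvRcount cs n (pvBStep cs n).toNat % 2 = 0
    · rw [if_pos hpar]
      by_cases hend : (pvBStep cs n).toNat = cs.length - 1
      · rw [if_pos hend, pvALoop, if_neg (by omega)]
        have hcond : ¬((pvBStep cs n).toNat ≠ cs.length - 1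
            ∨ cs.getD (cs.length - 1) ' ' ≠ '"') := by
          rw [hend, hlast]; simp
        simp only []
        rw [if_neg hcond]
        exact (decide_eq_true hpar).symm
      · rw [if_neg hend, pvALoop, if_pos (by omega), if_neg (by rw [hq]; decide),
            if_pos hq, if_pos hpar]
    · rw [if_neg hpar, if_neg hpar]
      by_cases hend : (pvBStep cs n).toNat = cs.length - 1
      · rw [if_pos hend, pvALoop, if_neg (by omega)]
        simp only []
        rw [if_pos (Or.inl (by omega)), eq_comm, decide_eq_false_iff_not]
        exact hpar
      · rw [if_neg hend]
        have hih := pv_main cs ((pvBStep cs n).toNat + 1) h2 hlast (by omega) (by omega)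
          (by rw [show (pvBStep cs n).toNat + 1 - 1 = (pvBStep cs n).toNat from by omega, hq]
              decide)
        exact hih
termination_by cs.length - n
decreasing_by omega

-- ===== VERDICT (by name: the statement is the Claim_ definition above) =====
theorem is_valid_quotestr_spec : Claim_equal_is_valid_quotestr := by
  intro s _
  unfold Spec_is_valid_quotestr is_valid_quotestr is_valid_quotestr_alt
  by_cases h2 : s.toList.length < 2
  · rw [if_pos h2, if_pos (Or.inl h2)]
  · by_cases h0 : s.toList.getD 0 ' ' ≠ '"'
    · rw [if_neg h2, if_pos h0, if_pos (Or.inr (Or.inl h0))]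
    · by_cases hl : s.toList.getD (s.toList.length - 1) ' ' ≠ '"'
      · rw [if_neg h2, if_neg h0, if_pos (Or.inr (Or.inr hl))]
        cases hA : pvALoop s.toList 1 with
        | none => rfl
        | some i => simp only [if_pos (Or.inr hl)]
      · rw [if_neg h2, if_neg h0, if_neg (by tauto)]
        simp only [not_not] at h0 hl
        exact pv_main s.toList 1 (by omega) hl le_rfl (by omega)
          (by rw [h0]; decide)
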